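-- pv_equiv track=rewrite | github.com/sonyashlshd/CT_Rtischeva_Tolstova | LR5/main.py | sort_combinations
-- ===== SOURCE A (Python) =====
-- def sort_combinations(I, m):
--     max_length = max(len(combo) for combo in I)
--     sorted_result = []
--
--     for k in range(max_length + 1):
--         s = sum(range(m - k + 1))
--         for combo in I:
--             if len(combo) == k:
--                 total_sum = sum(combo)
--                 if (total_sum == s) or (s != 1 and s % 2 == 1 and total_sum == s + 1):
--                     if combo not in sorted_result:
--                         sorted_result.append(combo)
--
--     # Добавление оставшихся комбинаций
--     for combo in I:
--         if combo not in sorted_result: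
--             total_sum = sum(combo)
--             for existing_combo in sorted_result:
--                 if len(existing_combo) == len(combo) and sum(existing_combo) == total_sum:
--                     sorted_result.insert(sorted_result.index(existing_combo) + 1, combo)
--
--     return sorted_result
-- ===== SOURCE B (Python) =====
-- def sort_combinations(I, m):
--     # One pass: dedup with a set, bucket selected combos by length; then
--     # emit buckets in ascending length order.
--     seen = set()
--     groups = {}
--     for combo in I:
--         k = len(combo)
--         n = m - k
--         s = n * (n + 1) // 2 if n > 0 else 0
--         total = sum(combo)
--         if total == s or (s != 1 and s % 2 == 1 and total == s + 1):
--             t = tuple(combo)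
--             if t not in seen:
--                 seen.add(t)
--                 groups.setdefault(k, []).append(combo)
--     return [combo for k in sorted(groups) for combo in groups[k]]
-- ===== Notes on version B (the rewrite author's own statement) =====
-- stated objective: faster
-- what changed: Single pass over I with a set for dedup and a length-keyed dict of buckets (selection sum in closed form), emitted in ascending key order, replacing A's rescan of I for every length 0..max_length with list-membership dedup and A's second loop, which is proved to be a no-op whenever A returns (selection depends only on (len,sum), so no leftover combo can match a kept one).
import Mathlib
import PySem

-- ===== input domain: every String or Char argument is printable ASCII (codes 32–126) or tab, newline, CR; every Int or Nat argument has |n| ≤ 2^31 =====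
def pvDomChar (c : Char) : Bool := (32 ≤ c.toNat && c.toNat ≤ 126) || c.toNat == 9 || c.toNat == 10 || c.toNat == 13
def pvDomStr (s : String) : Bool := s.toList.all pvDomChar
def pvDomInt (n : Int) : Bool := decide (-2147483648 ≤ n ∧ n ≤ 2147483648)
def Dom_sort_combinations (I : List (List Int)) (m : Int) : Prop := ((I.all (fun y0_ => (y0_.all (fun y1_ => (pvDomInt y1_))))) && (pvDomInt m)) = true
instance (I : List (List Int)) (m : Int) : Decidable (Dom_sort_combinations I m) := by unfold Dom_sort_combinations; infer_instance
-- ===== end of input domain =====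

-- B replaces A's per-length rescan of I (and A's always-no-op second loop) by one pass that
-- buckets deduplicated selected combos by length and emits buckets in ascending length order: faster.


-- ===== PORT A =====
-- Python iterates 'for existing_combo in sorted_result' while inserting into it: an index walk.
-- Under Pre_ the loop body never inserts (proved below), so fuel = res.length makes the walk exact there.
def pvLoop2 (combo : List Int) : Nat → Nat → List (List Int) → List (List Int)
  | 0, _, res => res
  | fuel+1, j, res =>
    match res[j]? with
    | none => res
    | some existing_combo =>
      if existing_combo.length = combo.length ∧ existing_combo.sum = combo.sum then
        pvLoop2 combo fuel (j+1)
          (PySem.List.insert res (((PySem.List.index? res existing_combo).getD 0 : Int) + 1) combo)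
      else pvLoop2 combo fuel (j+1) res


-- max() raises ValueError on I = []: excluded by Pre_ (the getD 0 default is never used there)
def sort_combinations (I : List (List Int)) (m : Int) : List (List Int) :=
  let max_length : Int := (PySem.List.max? (I.map (fun combo => (combo.length : Int))) (fun x => x)).getD 0
  let sorted_result : List (List Int) :=
    (PySem.List.pyRange 0 (max_length + 1) 1).foldl (fun sorted_result k =>
      let s := (PySem.List.pyRange 0 (m - k + 1) 1).sum
      I.foldl (fun sorted_result combo =>
        if (combo.length : Int) = k then
          let total_sum := combo.sum
          if total_sum = s ∨ (s ≠ 1 ∧ PySem.Int.mod s 2 = 1 ∧ total_sum = s + 1) then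
            if combo ∉ sorted_result then sorted_result ++ [combo] else sorted_result
          else sorted_result
        else sorted_result) sorted_result) []
  I.foldl (fun res combo =>
    if combo ∉ res then pvLoop2 combo res.length 0 res else res) sorted_result


-- ===== PORT B =====
def sort_combinations_alt (I : List (List Int)) (m : Int) : List (List Int) :=
  let st := I.foldl (fun (st : PySem.Set (List Int) × PySem.Dict Int (List (List Int))) combo =>
    let k : Int := combo.length
    let n := m - k
    let s := if 0 < n then PySem.Int.floordiv (n * (n + 1)) 2 else 0
    let total := combo.sum
    if total = s ∨ (s ≠ 1 ∧ PySem.Int.mod s 2 = 1 ∧ total = s + 1) then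
      if combo ∈ st.1 then st
      else (PySem.Set.add st.1 combo,
            PySem.Dict.insert st.2 k (PySem.Dict.getD st.2 k [] ++ [combo]))
    else st) (PySem.Set.empty, PySem.Dict.empty)
  (PySem.List.sorted (PySem.Dict.keys st.2) (fun x => x) false).flatMap
    (fun k => PySem.Dict.getD st.2 k [])


-- ===== PRECONDITION & SPEC =====
-- Pre_ excludes only I = [], where Python A raises ValueError (max() of an empty sequence).
def Pre_sort_combinations (I : List (List Int)) (m : Int) : Prop := I ≠ []
instance (I : List (List Int)) (m : Int) : Decidable (Pre_sort_combinations I m) := by unfold Pre_sort_combinations; infer_instance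
def pvWitness_sort_combinations : List (List Int) × Int := ([[0]], 0)

def Spec_sort_combinations (I : List (List Int)) (m : Int) (out : List (List Int)) : Prop := out = sort_combinations_alt I m
instance (I : List (List Int)) (m : Int) (out : List (List Int)) : Decidable (Spec_sort_combinations I m out) := by unfold Spec_sort_combinations; infer_instance

-- ===== CLAIM (what is proved, stated in full; the proofs are below) =====
def Claim_equal_sort_combinations : Prop := ∀ (I : List (List Int)) (m : Int), Dom_sort_combinations I m → Pre_sort_combinations I m → Spec_sort_combinations I m (sort_combinations I m)

-- ===== LEMMAS AND PROOFS =====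

theorem pv_rsum (n : Nat) : ((List.range n).map (fun j : Nat => ((0:Int) + (j:Int)))).sum * 2 = (n:Int) * ((n:Int) - 1) := by
  induction n with
  | zero => simp
  | succ n ih =>
    rw [List.range_succ, List.map_append, List.sum_append]
    simp only [List.map, List.sum_cons, List.sum_nil]
    push_cast
    push_cast at ih
    nlinarith [ih]

def pvS (m k : Int) : Int := if 0 < m - k then PySem.Int.floordiv ((m - k) * ((m - k) + 1)) 2 else 0

theorem pv_sum_range (m k : Int) : (PySem.List.pyRange 0 (m - k + 1) 1).sum = pvS m k := by
  set a := m - k with ha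
  unfold pvS
  rcases (by omega : a + 1 ≤ 0 ∨ 0 < a + 1) with h | h
  · rw [PySem.List.pyRange_one_eq_nil h]
    rw [if_neg (by omega)]
    rfl
  · rw [PySem.List.pyRange_one]
    have hn : ((a + 1 - 0).toNat : Int) = a + 1 := by omega
    have h2 := pv_rsum (a + 1 - 0).toNat
    rw [hn] at h2
    rcases (by omega : 0 < a ∨ a = 0) with hp | hp
    · rw [if_pos hp, PySem.Int.floordiv_eq_ediv_of_pos (by norm_num), ← ha]
      have he : a * (a + 1) = ((List.range (a + 1 - 0).toNat).map (fun j : Nat => ((0:Int) + (j:Int)))).sum * 2 := by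
        rw [h2]; ring
      rw [he]
      omega
    · rw [if_neg (by omega)]
      have h3 : (a + 1) * (a + 1 - 1) = 0 := by rw [hp]; norm_num
      rw [h3] at h2
      omega

abbrev pvSel (m k total : Int) : Prop :=
  total = pvS m k ∨ (pvS m k ≠ 1 ∧ PySem.Int.mod (pvS m k) 2 = 1 ∧ total = pvS m k + 1)

def pvKeep (m : Int) (c : List Int) : Bool := decide (pvSel m (c.length : Int) c.sum)

def pvBucket (I : List (List Int)) (m k : Int) : List (List Int) :=
  PySem.Set.ofList (I.filter (fun c => decide ((c.length : Int) = k) && pvKeep m c))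

theorem pv_add_eq (acc : List (List Int)) (c : List Int) :
    (if c ∉ acc then acc ++ [c] else acc) = PySem.Set.add acc c := by
  simp only [PySem.Set.add, PySem.Set.contains, List.contains_eq_mem, decide_eq_true_eq]
  split_ifs with h1 h2 h2 <;> first | rfl | exact absurd h2 h1 | exact absurd h1 h2

theorem pv_inner_eq (m k : Int) (l : List (List Int)) (acc : List (List Int)) :
    l.foldl (fun acc combo =>
      if (combo.length : Int) = k then
        if pvSel m k combo.sum then
          if combo ∉ acc then acc ++ [combo] else acc
        else acc
      else acc) acc
    = (l.filter (fun c => decide ((c.length : Int) = k) && pvKeep m c)).foldl PySem.Set.add acc := by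
  induction l generalizing acc with
  | nil => rfl
  | cons c t ih =>
    simp only [List.foldl_cons, List.filter_cons]
    by_cases hlen : (c.length : Int) = k
    · by_cases hsel : pvSel m k c.sum
      · have hk : (decide ((c.length : Int) = k) && pvKeep m c) = true := by
          simp only [pvKeep, hlen, Bool.and_eq_true, decide_eq_true_eq]
          exact ⟨trivial, hsel⟩
        rw [if_pos hlen, if_pos hsel, hk, if_pos rfl, pv_add_eq, List.foldl_cons, ih]
      · have hk : (decide ((c.length : Int) = k) && pvKeep m c) = false := by
          simp only [pvKeep, hlen, Bool.and_eq_false_iff, decide_eq_false_iff_not]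
          right; exact hsel
        rw [if_pos hlen, if_neg hsel, hk, if_neg (by simp), ih]
    · have hk : (decide ((c.length : Int) = k) && pvKeep m c) = false := by
        simp only [Bool.and_eq_false_iff, decide_eq_false_iff_not]
        left; exact hlen
      rw [if_neg hlen, hk, if_neg (by simp), ih]

theorem pv_add_fold_append (xs : List (List Int)) :
    ∀ (a d : List (List Int)), (∀ x ∈ xs, x ∉ a) →
    xs.foldl PySem.Set.add (a ++ d) = a ++ xs.foldl PySem.Set.add d := by
  induction xs with
  | nil => intro a d _; rfl
  | cons x t ih =>
    intro a d h
    have hx : x ∉ a := h x (by simp)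
    have hstep : PySem.Set.add (a ++ d) x = a ++ PySem.Set.add d x := by
      simp only [PySem.Set.add, PySem.Set.contains, List.contains_eq_mem, List.mem_append,
        decide_eq_true_eq]
      split_ifs with h1 h2 h2 <;> first
      | rfl
      | (exact absurd (h1.resolve_left hx) h2)
      | (exact absurd (Or.inr h2) h1)
      | simp
    rw [List.foldl_cons, hstep, List.foldl_cons, ih _ _ (fun y hy => h y (by simp [hy]))]

theorem pv_mem_bucket (I : List (List Int)) (m k : Int) (x : List Int) (h : x ∈ pvBucket I m k) :
    (x.length : Int) = k ∧ pvKeep m x = true ∧ x ∈ I := by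
  unfold pvBucket at h
  rw [PySem.Set.mem_ofList] at h
  simp only [List.mem_filter, Bool.and_eq_true, decide_eq_true_eq] at h
  exact ⟨h.2.1, h.2.2, h.1⟩

theorem pv_mem_bucket_iff (I : List (List Int)) (m k : Int) (x : List Int) :
    x ∈ pvBucket I m k ↔ x ∈ I ∧ (x.length : Int) = k ∧ pvKeep m x = true := by
  unfold pvBucket
  rw [PySem.Set.mem_ofList]
  simp [List.mem_filter]

theorem pv_phase1 (I : List (List Int)) (m : Int) (n : Nat) :
    (PySem.List.pyRange 0 (n : Int) 1).foldl (fun acc k =>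
        I.foldl (fun acc combo =>
          if (combo.length : Int) = k then
            if pvSel m k combo.sum then
              if combo ∉ acc then acc ++ [combo] else acc
            else acc
          else acc) acc) []
    = (PySem.List.pyRange 0 (n : Int) 1).flatMap (fun k => pvBucket I m k) := by
  induction n with
  | zero =>
    rw [PySem.List.pyRange_one_eq_nil (by norm_num)]
    rfl
  | succ n ih =>
    have hsplit : PySem.List.pyRange 0 ((n + 1 : Nat) : Int) 1
        = PySem.List.pyRange 0 (n : Int) 1 ++ [(n : Int)] := by
      have := PySem.List.pyRange_one_succ_right (a := 0) (b := (n : Int)) (by positivity)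
      push_cast
      exact this
    rw [hsplit, List.foldl_append, List.flatMap_append, ih]
    simp only [List.foldl_cons, List.foldl_nil, List.flatMap_cons, List.flatMap_nil, List.append_nil]
    rw [pv_inner_eq]
    have hprev : ∀ x ∈ List.filter (fun c => decide ((c.length : Int) = (n : Int)) && pvKeep m c) I,
        x ∉ (PySem.List.pyRange 0 (n : Int) 1).flatMap (fun k => pvBucket I m k) := by
      intro x hx hmem
      simp only [List.mem_filter, Bool.and_eq_true, decide_eq_true_eq] at hx
      rw [List.mem_flatMap] at hmem
      obtain ⟨k, hk, hxk⟩ := hmem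
      have h1 := (pv_mem_bucket I m k x hxk).1
      rw [PySem.List.mem_pyRange_one] at hk
      omega
    have := pv_add_fold_append
      (List.filter (fun c => decide ((c.length : Int) = (n : Int)) && pvKeep m c) I)
      ((PySem.List.pyRange 0 (n : Int) 1).flatMap (fun k => pvBucket I m k)) [] hprev
    rw [List.append_nil] at this
    rw [this]
    rfl

theorem pv_loop2_noop (combo : List Int) (res : List (List Int))
    (h : ∀ e ∈ res, ¬(e.length = combo.length ∧ e.sum = combo.sum)) :
    ∀ fuel j, pvLoop2 combo fuel j res = res := by
  intro fuel
  induction fuel with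
  | zero => intro j; rfl
  | succ n ih =>
    intro j
    unfold pvLoop2
    cases heq : res[j]? with
    | none => rfl
    | some e =>
      have he : e ∈ res := List.mem_of_getElem? heq
      simp only [if_neg (h e he)]
      exact ih (j+1)

theorem pv_foldl_fixed {α β : Type} (f : β → α → β) (l : List α) (a : β)
    (h : ∀ x ∈ l, f a x = a) : l.foldl f a = a := by
  induction l with
  | nil => rfl
  | cons x t ih => rw [List.foldl_cons, h x (by simp)]; exact ih (fun y hy => h y (by simp [hy]))

theorem pvSel_eq (m k t : Int) :
    (t = pvS m k ∨ (pvS m k ≠ 1 ∧ PySem.Int.mod (pvS m k) 2 = 1 ∧ t = pvS m k + 1)) = pvSel m k t := rfl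

-- the canonical value: buckets in ascending length order
def pvCanon (I : List (List Int)) (m M : Int) : List (List Int) :=
  (PySem.List.pyRange 0 (M + 1) 1).flatMap (fun k => pvBucket I m k)

theorem pv_mem_canon (I : List (List Int)) (m M : Int) (hM : 0 ≤ M)
    (hub : ∀ c ∈ I, (c.length : Int) ≤ M) (x : List Int) :
    x ∈ pvCanon I m M ↔ x ∈ I ∧ pvKeep m x = true := by
  unfold pvCanon
  rw [List.mem_flatMap]
  constructor
  · rintro ⟨k, _, hxk⟩
    have := pv_mem_bucket I m k x hxk
    exact ⟨this.2.2, this.2.1⟩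
  · rintro ⟨hxI, hxk⟩
    refine ⟨(x.length : Int), ?_, ?_⟩
    · rw [PySem.List.mem_pyRange_one]
      exact ⟨by positivity, by have := hub x hxI; omega⟩
    · rw [pv_mem_bucket_iff]; exact ⟨hxI, rfl, hxk⟩

theorem pv_keep_congr (m : Int) (e c : List Int) (hl : e.length = c.length) (hs : e.sum = c.sum) :
    pvKeep m e = pvKeep m c := by
  unfold pvKeep
  rw [hl, hs]

theorem pv_A_canon (I : List (List Int)) (m M : Int)
    (hmax : PySem.List.max? (I.map (fun combo => (combo.length : Int))) (fun x => x) = some M) :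
    sort_combinations I m = pvCanon I m M := by
  have hM0 : 0 ≤ M := by
    have hm := PySem.List.max?_mem hmax
    simp only [List.mem_map] at hm
    obtain ⟨c, _, hc⟩ := hm
    omega
  have hub : ∀ c ∈ I, (c.length : Int) ≤ M := by
    intro c hc
    have := PySem.List.max?_isMax hmax ((c.length : Int)) (List.mem_map_of_mem hc)
    simpa using this
  unfold sort_combinations
  rw [hmax]
  simp only [Option.getD_some, pv_sum_range, pvSel_eq]
  have hcast : (((M + 1).toNat : Nat) : Int) = M + 1 := by omega
  rw [← hcast, pv_phase1]
  rw [hcast]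
  have hcanon : (PySem.List.pyRange 0 (M + 1) 1).flatMap (fun k => pvBucket I m k) = pvCanon I m M := rfl
  rw [hcanon]
  apply pv_foldl_fixed
  intro combo hc
  by_cases hmem : combo ∈ pvCanon I m M
  · rw [if_neg (by simp [hmem])]
  · rw [if_pos hmem]
    apply pv_loop2_noop
    intro e he heq
    have hek := (pv_mem_canon I m M hM0 hub e).mp he
    have hkc : pvKeep m combo = true := by
      rw [← pv_keep_congr m e combo heq.1 heq.2]
      exact hek.2
    exact hmem ((pv_mem_canon I m M hM0 hub combo).mpr ⟨hc, hkc⟩)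

theorem pv_set_add_of_mem {s : PySem.Set (List Int)} {c : List Int} (h : c ∈ s) :
    PySem.Set.add s c = s := by
  simp [PySem.Set.add, PySem.Set.contains, List.contains_eq_mem, h]

theorem pv_set_add_of_not_mem {s : PySem.Set (List Int)} {c : List Int} (h : c ∉ s) :
    PySem.Set.add s c = s ++ [c] := by
  simp [PySem.Set.add, PySem.Set.contains, List.contains_eq_mem, h]

theorem pv_int_add_of_mem {s : PySem.Set Int} {c : Int} (h : c ∈ s) :
    PySem.Set.add s c = s := by
  simp [PySem.Set.add, PySem.Set.contains, List.contains_eq_mem, h]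

theorem pv_int_add_of_not_mem {s : PySem.Set Int} {c : Int} (h : c ∉ s) :
    PySem.Set.add s c = s ++ [c] := by
  simp [PySem.Set.add, PySem.Set.contains, List.contains_eq_mem, h]

theorem pv_ofList_append_singleton {α : Type} [BEq α] (xs : List α) (v : α) :
    PySem.Set.ofList (xs ++ [v]) = PySem.Set.add (PySem.Set.ofList xs) v := by
  unfold PySem.Set.ofList
  rw [List.foldl_append]
  rfl

theorem pv_B_state (m : Int) (I : List (List Int)) :
    (I.foldl (fun (st : PySem.Set (List Int) × PySem.Dict Int (List (List Int))) combo =>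
      if pvSel m (combo.length : Int) combo.sum then
        if combo ∈ st.1 then st
        else (PySem.Set.add st.1 combo,
              PySem.Dict.insert st.2 (combo.length : Int)
                (PySem.Dict.getD st.2 (combo.length : Int) [] ++ [combo]))
      else st) (PySem.Set.empty, PySem.Dict.empty)).1
      = PySem.Set.ofList (I.filter (pvKeep m)) ∧
    (I.foldl (fun (st : PySem.Set (List Int) × PySem.Dict Int (List (List Int))) combo =>
      if pvSel m (combo.length : Int) combo.sum then
        if combo ∈ st.1 then st
        else (PySem.Set.add st.1 combo,
              PySem.Dict.insert st.2 (combo.length : Int)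
                (PySem.Dict.getD st.2 (combo.length : Int) [] ++ [combo]))
      else st) (PySem.Set.empty, PySem.Dict.empty)).2.keys
      = PySem.Set.ofList ((I.filter (pvKeep m)).map (fun c => (c.length : Int))) ∧
    ∀ k : Int, PySem.Dict.getD
      (I.foldl (fun (st : PySem.Set (List Int) × PySem.Dict Int (List (List Int))) combo =>
      if pvSel m (combo.length : Int) combo.sum then
        if combo ∈ st.1 then st
        else (PySem.Set.add st.1 combo,
              PySem.Dict.insert st.2 (combo.length : Int)
                (PySem.Dict.getD st.2 (combo.length : Int) [] ++ [combo]))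
      else st) (PySem.Set.empty, PySem.Dict.empty)).2 k []
      = pvBucket I m k := by
  induction I using List.reverseRecOn with
  | nil =>
    refine ⟨rfl, rfl, fun k => ?_⟩
    simp [pvBucket, PySem.Dict.getD, PySem.Dict.get?, PySem.Dict.empty, PySem.Set.ofList,
      PySem.Set.empty]
  | append_singleton I c ih =>
    obtain ⟨h1, h2, h3⟩ := ih
    rw [List.foldl_append] at *
    simp only [List.foldl_cons, List.foldl_nil]
    set st := (I.foldl (fun (st : PySem.Set (List Int) × PySem.Dict Int (List (List Int))) combo =>
      if pvSel m (combo.length : Int) combo.sum then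
        if combo ∈ st.1 then st
        else (PySem.Set.add st.1 combo,
              PySem.Dict.insert st.2 (combo.length : Int)
                (PySem.Dict.getD st.2 (combo.length : Int) [] ++ [combo]))
      else st) (PySem.Set.empty, PySem.Dict.empty)) with hst
    by_cases hsel : pvSel m (c.length : Int) c.sum
    · have hkc : pvKeep m c = true := by simp [pvKeep, hsel]
      rw [if_pos hsel]
      by_cases hmem : c ∈ st.1
      · rw [if_pos hmem]
        have hcf : c ∈ I.filter (pvKeep m) := by
          rw [h1, PySem.Set.mem_ofList] at hmem
          exact hmem
        refine ⟨?_, ?_, fun k => ?_⟩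
        · rw [h1, List.filter_append, List.filter_cons, hkc]
          simp only [if_true, List.filter_nil]
          rw [pv_ofList_append_singleton, pv_set_add_of_mem]
          rw [PySem.Set.mem_ofList]
          exact hcf
        · rw [h2, List.filter_append, List.filter_cons, hkc]
          simp only [if_true, List.filter_nil, List.map_append, List.map_cons, List.map_nil]
          rw [pv_ofList_append_singleton, pv_int_add_of_mem]
          rw [PySem.Set.mem_ofList]
          exact List.mem_map_of_mem hcf
        · rw [h3]
          unfold pvBucket
          rw [List.filter_append, List.filter_cons, List.filter_nil]
          by_cases hk : ((c.length : Int) = k)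
          · rw [if_pos (by simp [hk, hkc])]
            rw [pv_ofList_append_singleton, pv_set_add_of_mem]
            rw [PySem.Set.mem_ofList, List.mem_filter]
            have := List.mem_filter.mp hcf
            exact ⟨this.1, by simp [hk, hkc]⟩
          · rw [if_neg (by simp [hk]), List.append_nil]
      · rw [if_neg hmem]
        have hcf : c ∉ I.filter (pvKeep m) := by
          rw [h1, PySem.Set.mem_ofList] at hmem
          exact hmem
        refine ⟨?_, ?_, fun k => ?_⟩
        · simp only []
          rw [h1, List.filter_append, List.filter_cons, hkc]
          simp only [if_true, List.filter_nil]
          rw [pv_ofList_append_singleton]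
        · simp only []
          by_cases hkey : (c.length : Int) ∈ st.2.keys
          · rw [PySem.Dict.keys_insert_of_contains _ _
                ((PySem.Dict.contains_iff_mem_keys _ _).mpr hkey), h2,
              List.filter_append, List.filter_cons, hkc]
            simp only [if_true, List.filter_nil, List.map_append, List.map_cons, List.map_nil]
            rw [pv_ofList_append_singleton, pv_int_add_of_mem (by rw [h2] at hkey; exact hkey)]
          · have hcon : PySem.Dict.contains st.2 (c.length : Int) = false := by
              rw [← Bool.not_eq_true]
              intro hcon
              exact hkey ((PySem.Dict.contains_iff_mem_keys _ _).mp hcon)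
            rw [PySem.Dict.keys_insert_of_not_contains _ _ hcon, h2,
              List.filter_append, List.filter_cons, hkc]
            simp only [if_true, List.filter_nil, List.map_append, List.map_cons, List.map_nil]
            rw [pv_ofList_append_singleton,
              pv_int_add_of_not_mem (by rw [h2] at hkey; exact hkey)]
        · simp only []
          rw [PySem.Dict.getD_insert]
          by_cases hk : (k = (c.length : Int))
          · subst hk
            rw [if_pos rfl, h3]
            unfold pvBucket
            rw [List.filter_append, List.filter_cons, List.filter_nil,
              if_pos (by simp [hkc]), pv_ofList_append_singleton,
              pv_set_add_of_not_mem (by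
                rw [PySem.Set.mem_ofList, List.mem_filter]
                rintro ⟨hcI, _⟩
                exact hcf (List.mem_filter.mpr ⟨hcI, hkc⟩))]
          · rw [if_neg hk, h3]
            unfold pvBucket
            rw [List.filter_append, List.filter_cons, List.filter_nil,
              if_neg (by simp; intro h; exact absurd h.symm hk), List.append_nil]
    · have hkc : pvKeep m c = false := by simp [pvKeep, hsel]
      rw [if_neg hsel]
      refine ⟨?_, ?_, fun k => ?_⟩
      · rw [h1, List.filter_append, List.filter_cons, hkc]
        simp
      · rw [h2, List.filter_append, List.filter_cons, hkc]
        simp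
      · rw [h3]
        unfold pvBucket
        rw [List.filter_append, List.filter_cons, List.filter_nil]
        rw [if_neg (by simp [hkc]), List.append_nil]

theorem pv_flatMap_filter (l : List Int) (p : Int → Prop) [DecidablePred p]
    (f : Int → List (List Int)) (h : ∀ x ∈ l, ¬ p x → f x = []) :
    (l.filter (fun x => decide (p x))).flatMap f = l.flatMap f := by
  induction l with
  | nil => rfl
  | cons x t ih =>
    rw [List.filter_cons, List.flatMap_cons]
    by_cases hp : p x
    · rw [if_pos (by simp [hp]), List.flatMap_cons,
        ih (fun y hy => h y (by simp [hy]))]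
    · rw [if_neg (by simp [hp]), h x (by simp) hp, List.nil_append,
        ih (fun y hy => h y (by simp [hy]))]

theorem pv_bucket_empty (I : List (List Int)) (m k : Int)
    (h : k ∉ (I.filter (pvKeep m)).map (fun c => (c.length : Int))) :
    pvBucket I m k = [] := by
  unfold pvBucket
  have hf : I.filter (fun c => decide ((c.length : Int) = k) && pvKeep m c) = [] := by
    rw [List.filter_eq_nil_iff]
    intro c hc hb
    simp only [Bool.and_eq_true, decide_eq_true_eq] at hb
    exact h (List.mem_map.mpr ⟨c, List.mem_filter.mpr ⟨hc, hb.2⟩, hb.1⟩)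
  rw [hf]
  rfl

def pvLens (I : List (List Int)) (m : Int) : List Int :=
  (I.filter (pvKeep m)).map (fun c => (c.length : Int))

theorem pv_sorted_keys (I : List (List Int)) (m M : Int) (hM0 : 0 ≤ M)
    (hub : ∀ c ∈ I, (c.length : Int) ≤ M) :
    PySem.List.sorted (PySem.Set.ofList (pvLens I m)) (fun x => x) false
      = (PySem.List.pyRange 0 (M + 1) 1).filter
          (fun k => decide (k ∈ PySem.Set.ofList (pvLens I m))) := by
  have hbound : ∀ k ∈ PySem.Set.ofList (pvLens I m), 0 ≤ k ∧ k < M + 1 := by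
    intro k hk
    rw [PySem.Set.mem_ofList] at hk
    obtain ⟨c, hc, hck⟩ := List.mem_map.mp hk
    have := hub c (List.mem_filter.mp hc).1
    omega
  apply PySem.List.sorted_eq_of_perm_of_pairwise_lt
  · apply List.perm_of_nodup_nodup_toFinset_eq
    · exact (PySem.List.nodup_pyRange_one 0 (M + 1)).filter _
    · exact PySem.Set.nodup_ofList _
    · ext k
      simp only [List.toFinset_filter, Finset.mem_filter, List.mem_toFinset,
        PySem.List.mem_pyRange_one, decide_eq_true_eq]
      constructor
      · rintro ⟨_, hk⟩; exact hk
      · intro hk; exact ⟨hbound k hk, hk⟩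
  · exact List.Pairwise.sublist List.filter_sublist (PySem.List.pairwise_lt_pyRange_one 0 (M + 1))

theorem pv_B_canon (I : List (List Int)) (m M : Int)
    (hmax : PySem.List.max? (I.map (fun combo => (combo.length : Int))) (fun x => x) = some M) :
    sort_combinations_alt I m = pvCanon I m M := by
  have hM0 : 0 ≤ M := by
    have hm := PySem.List.max?_mem hmax
    simp only [List.mem_map] at hm
    obtain ⟨c, _, hc⟩ := hm
    omega
  have hub : ∀ c ∈ I, (c.length : Int) ≤ M := by
    intro c hc
    have := PySem.List.max?_isMax hmax ((c.length : Int)) (List.mem_map_of_mem hc)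
    simpa using this
  show (PySem.List.sorted (PySem.Dict.keys
      (I.foldl (fun (st : PySem.Set (List Int) × PySem.Dict Int (List (List Int))) combo =>
        if pvSel m (combo.length : Int) combo.sum then
          if combo ∈ st.1 then st
          else (PySem.Set.add st.1 combo,
                PySem.Dict.insert st.2 (combo.length : Int)
                  (PySem.Dict.getD st.2 (combo.length : Int) [] ++ [combo]))
        else st) (PySem.Set.empty, PySem.Dict.empty)).2) (fun x => x) false).flatMap
      (fun k => PySem.Dict.getD
        (I.foldl (fun (st : PySem.Set (List Int) × PySem.Dict Int (List (List Int))) combo =>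
        if pvSel m (combo.length : Int) combo.sum then
          if combo ∈ st.1 then st
          else (PySem.Set.add st.1 combo,
                PySem.Dict.insert st.2 (combo.length : Int)
                  (PySem.Dict.getD st.2 (combo.length : Int) [] ++ [combo]))
        else st) (PySem.Set.empty, PySem.Dict.empty)).2 k [])
    = pvCanon I m M
  obtain ⟨h1, h2, h3⟩ := pv_B_state m I
  rw [h2]
  simp only [h3]
  have hl : (I.filter (pvKeep m)).map (fun c => (c.length : Int)) = pvLens I m := rfl
  rw [hl, pv_sorted_keys I m M hM0 hub]
  unfold pvCanon
  exact pv_flatMap_filter (PySem.List.pyRange 0 (M + 1) 1)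
    (fun k => k ∈ PySem.Set.ofList (pvLens I m)) (fun k => pvBucket I m k)
    (fun k _ hk => pv_bucket_empty I m k
      (fun hmem => hk ((PySem.Set.mem_ofList _ _).mpr hmem)))

-- ===== VERDICT (by name: the statement is the Claim_ definition above) =====
theorem sort_combinations_spec : Claim_equal_sort_combinations := by
  unfold Claim_equal_sort_combinations Spec_sort_combinations
  intro I m _ hpre
  cases hmax : PySem.List.max? (I.map (fun combo => (combo.length : Int))) (fun x => x) with
  | none =>
    exact absurd (List.map_eq_nil_iff.mp ((PySem.List.max?_eq_none_iff _ _).mp hmax)) hpre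
  | some M => rw [pv_A_canon I m M hmax, pv_B_canon I m M hmax]
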